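-- pv_equiv track=rewrite | github.com/Ragnvald88/bruce_springsteen_monitor | fansale_ultimate_enhanced.py | categorize_ticket
-- ===== SOURCE A (Python) =====
-- def categorize_ticket(text):
--     """Enhanced ticket categorization"""
--     text_lower = text.lower()
--
--     # Primary categories
--     if 'prato a' in text_lower or 'prato gold' in text_lower:
--         return 'prato_a'
--     elif 'prato b' in text_lower or 'prato silver' in text_lower:
--         return 'prato_b'
--     elif any(f'settore {i}' in text_lower for i in range(1, 30)):
--         return 'settore'
--     elif 'tribuna' in text_lower:
--         return 'tribuna'
--     elif 'vip' in text_lower or 'hospitality' in text_lower: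
--         return 'vip'
--     elif 'pit' in text_lower or 'parterre' in text_lower:
--         return 'pit'
--     else:
--         return 'other'
-- ===== SOURCE B (Python) =====
-- # Single left-to-right scan over the text: at each position find the best-priority
-- # pattern that STARTS there (startswith, no substring searches) and keep the minimum
-- # priority seen; the 29 sector substrings collapse to the nine single-digit prefixes.
--
-- _CATS = ['prato_a', 'prato_b', 'settore', 'tribuna', 'vip', 'pit', 'other']
-- _SET9 = tuple('settore %d' % d for d in range(1, 10))
--
-- def _match_at(t, i):
--     """Priority of the best category whose pattern begins at position i (6 = none)."""
--     if t.startswith(('prato a', 'prato gold'), i):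
--         return 0
--     if t.startswith(('prato b', 'prato silver'), i):
--         return 1
--     if t.startswith(_SET9, i):
--         return 2
--     if t.startswith('tribuna', i):
--         return 3
--     if t.startswith(('vip', 'hospitality'), i):
--         return 4
--     if t.startswith(('pit', 'parterre'), i):
--         return 5
--     return 6
--
-- def categorize_ticket(text):
--     t = text.lower()
--     best = 6
--     for i in range(len(t)):
--         best = min(best, _match_at(t, i))
--     return _CATS[best]
-- ===== Notes on version B (the rewrite author's own statement) =====
-- stated objective: alternative
-- what changed: Replaced the per-pattern substring-search chain by a single left-to-right scan of the text that, at each position, checks which pattern starts there (str.startswith with an offset) and keeps the minimum-priority category seen; the 29 two-digit-and-one-digit sector substrings collapse to the nine single-digit prefixes.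
import Mathlib
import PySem

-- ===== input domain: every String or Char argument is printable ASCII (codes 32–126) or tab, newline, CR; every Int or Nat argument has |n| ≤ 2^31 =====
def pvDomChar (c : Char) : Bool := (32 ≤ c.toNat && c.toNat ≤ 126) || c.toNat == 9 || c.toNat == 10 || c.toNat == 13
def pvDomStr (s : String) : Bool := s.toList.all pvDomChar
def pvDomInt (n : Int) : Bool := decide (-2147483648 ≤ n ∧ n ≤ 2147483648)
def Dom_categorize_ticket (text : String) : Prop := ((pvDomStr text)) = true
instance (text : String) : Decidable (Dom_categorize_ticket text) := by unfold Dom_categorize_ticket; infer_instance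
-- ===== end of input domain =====

-- B replaces A's per-pattern substring-search chain by a single left-to-right scan that,
-- at each position, checks which pattern STARTS there and keeps the minimum-priority
-- category seen (the 29 sector substrings collapse to the nine single-digit prefixes).

-- ===== PORT A =====
def categorize_ticket (text : String) : String :=
  let text_lower := PySem.Str.lower text
  if PySem.Str.isIn "prato a" text_lower || PySem.Str.isIn "prato gold" text_lower then
    "prato_a"
  else if PySem.Str.isIn "prato b" text_lower || PySem.Str.isIn "prato silver" text_lower then
    "prato_b"
  else if (PySem.List.pyRange 1 30 1).any
      (fun i => PySem.Str.isIn ("settore " ++ PySem.Int.toStr i) text_lower) then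
    "settore"
  else if PySem.Str.isIn "tribuna" text_lower then
    "tribuna"
  else if PySem.Str.isIn "vip" text_lower || PySem.Str.isIn "hospitality" text_lower then
    "vip"
  else if PySem.Str.isIn "pit" text_lower || PySem.Str.isIn "parterre" text_lower then
    "pit"
  else
    "other"

-- ===== PORT B =====
-- strings are modelled as List Char; Python's `t.startswith(pat, i)` is `startswith (t.drop i) pat`,
-- and the scan over i in range(len(t)) is the structural recursion over the suffixes of t.
def pvCats : List String := ["prato_a", "prato_b", "settore", "tribuna", "vip", "pit", "other"]

def pvSet9 : List (List Char) :=
  ["settore 1".toList, "settore 2".toList, "settore 3".toList, "settore 4".toList,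
   "settore 5".toList, "settore 6".toList, "settore 7".toList, "settore 8".toList,
   "settore 9".toList]

-- Python's `t.startswith(tuple_of_pats, i)` is `any` of startswith over the tuple.
def pvMatchAt (s : List Char) : Nat :=
  if PySem.Chars.startswith s "prato a".toList || PySem.Chars.startswith s "prato gold".toList then 0
  else if PySem.Chars.startswith s "prato b".toList || PySem.Chars.startswith s "prato silver".toList then 1
  else if pvSet9.any (fun p => PySem.Chars.startswith s p) then 2
  else if PySem.Chars.startswith s "tribuna".toList then 3
  else if PySem.Chars.startswith s "vip".toList || PySem.Chars.startswith s "hospitality".toList then 4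
  else if PySem.Chars.startswith s "pit".toList || PySem.Chars.startswith s "parterre".toList then 5
  else 6

def pvScan : List Char → Nat → Nat
  | [], best => best
  | c :: rest, best => pvScan rest (min best (pvMatchAt (c :: rest)))

def categorize_ticket_alt (text : String) : String :=
  pvCats.getD (pvScan (PySem.Str.lower text).toList 6) "other"

-- ===== PRECONDITION & SPEC =====
def Spec_categorize_ticket (text : String) (out : String) : Prop := out = categorize_ticket_alt text
instance (text : String) (out : String) : Decidable (Spec_categorize_ticket text out) := by unfold Spec_categorize_ticket; infer_instance

-- ===== CLAIM (what is proved, stated in full; the proofs are below) =====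
def Claim_equal_categorize_ticket : Prop := ∀ (text : String), Dom_categorize_ticket text → Spec_categorize_ticket text (categorize_ticket text)

-- ===== LEMMAS AND PROOFS =====

-- the priority chain: first true flag (in priority order) wins, 6 = none
def pvChain (b0 b1 b2 b3 b4 b5 : Bool) : Nat :=
  if b0 then 0 else if b1 then 1 else if b2 then 2
  else if b3 then 3 else if b4 then 4 else if b5 then 5 else 6

-- the whole-string (substring-containment) category flags
def pvG0 (s : List Char) : Bool := PySem.Chars.isIn "prato a".toList s || PySem.Chars.isIn "prato gold".toList s
def pvG1 (s : List Char) : Bool := PySem.Chars.isIn "prato b".toList s || PySem.Chars.isIn "prato silver".toList s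
def pvG2 (s : List Char) : Bool := pvSet9.any (fun p => PySem.Chars.isIn p s)
def pvG3 (s : List Char) : Bool := PySem.Chars.isIn "tribuna".toList s
def pvG4 (s : List Char) : Bool := PySem.Chars.isIn "vip".toList s || PySem.Chars.isIn "hospitality".toList s
def pvG5 (s : List Char) : Bool := PySem.Chars.isIn "pit".toList s || PySem.Chars.isIn "parterre".toList s

lemma pv_isIn_cons (p : List Char) (c : Char) (r : List Char) :
    PySem.Chars.isIn p (c :: r) = (PySem.Chars.startswith (c :: r) p || PySem.Chars.isIn p r) := by
  rcases h : PySem.Chars.startswith (c :: r) p || PySem.Chars.isIn p r with _ | _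
  · simp only [Bool.or_eq_false_iff] at h
    rw [PySem.Chars.isIn_eq_false_iff]
    rw [List.infix_cons_iff]
    rintro (hp | hi)
    · exact absurd ((PySem.Chars.startswith_iff _ _).mpr hp) (by simp [h.1])
    · exact absurd ((PySem.Chars.isIn_iff_infix _ _).mpr hi) (by simp [h.2])
  · simp only [Bool.or_eq_true] at h
    rw [PySem.Chars.isIn_iff_infix, List.infix_cons_iff]
    rcases h with h | h
    · exact Or.inl ((PySem.Chars.startswith_iff _ _).mp h)
    · exact Or.inr ((PySem.Chars.isIn_iff_infix _ _).mp h)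

lemma pv_any_or {α : Type} (l : List α) (f g : α → Bool) :
    l.any (fun x => f x || g x) = (l.any f || l.any g) := by
  induction l with
  | nil => rfl
  | cons a t ih =>
      simp only [List.any_cons, ih]
      cases f a <;> cases g a <;> cases t.any f <;> cases t.any g <;> rfl

lemma pv_or_interchange (a b c d : Bool) : ((a || c) || (b || d)) = ((a || b) || (c || d)) := by
  cases a <;> cases b <;> cases c <;> cases d <;> rfl

-- one scan step extends each flag: flag on c :: r = (a pattern starts at the head) || flag on r
lemma pvG0_cons (c : Char) (r : List Char) :
    pvG0 (c :: r) = ((PySem.Chars.startswith (c :: r) "prato a".toList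
      || PySem.Chars.startswith (c :: r) "prato gold".toList) || pvG0 r) := by
  unfold pvG0; rw [pv_isIn_cons, pv_isIn_cons, pv_or_interchange]

lemma pvG1_cons (c : Char) (r : List Char) :
    pvG1 (c :: r) = ((PySem.Chars.startswith (c :: r) "prato b".toList
      || PySem.Chars.startswith (c :: r) "prato silver".toList) || pvG1 r) := by
  unfold pvG1; rw [pv_isIn_cons, pv_isIn_cons, pv_or_interchange]

lemma pvG2_cons (c : Char) (r : List Char) :
    pvG2 (c :: r) = (pvSet9.any (fun p => PySem.Chars.startswith (c :: r) p) || pvG2 r) := by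
  unfold pvG2
  simp only [pv_isIn_cons]
  exact pv_any_or _ _ _

lemma pvG3_cons (c : Char) (r : List Char) :
    pvG3 (c :: r) = (PySem.Chars.startswith (c :: r) "tribuna".toList || pvG3 r) := by
  unfold pvG3; rw [pv_isIn_cons]

lemma pvG4_cons (c : Char) (r : List Char) :
    pvG4 (c :: r) = ((PySem.Chars.startswith (c :: r) "vip".toList
      || PySem.Chars.startswith (c :: r) "hospitality".toList) || pvG4 r) := by
  unfold pvG4; rw [pv_isIn_cons, pv_isIn_cons, pv_or_interchange]

lemma pvG5_cons (c : Char) (r : List Char) :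
    pvG5 (c :: r) = ((PySem.Chars.startswith (c :: r) "pit".toList
      || PySem.Chars.startswith (c :: r) "parterre".toList) || pvG5 r) := by
  unfold pvG5; rw [pv_isIn_cons, pv_isIn_cons, pv_or_interchange]

lemma pvG_nil : pvG0 [] = false ∧ pvG1 [] = false ∧ pvG2 [] = false ∧
    pvG3 [] = false ∧ pvG4 [] = false ∧ pvG5 [] = false := by decide

-- min of two priority chains = chain of the pointwise disjunctions
lemma pvChain_min (a0 a1 a2 a3 a4 a5 b0 b1 b2 b3 b4 b5 : Bool) :
    min (pvChain a0 a1 a2 a3 a4 a5) (pvChain b0 b1 b2 b3 b4 b5)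
      = pvChain (a0 || b0) (a1 || b1) (a2 || b2) (a3 || b3) (a4 || b4) (a5 || b5) := by
  cases a0 <;> cases a1 <;> cases a2 <;> cases a3 <;> cases a4 <;> cases a5 <;>
    cases b0 <;> cases b1 <;> cases b2 <;> cases b3 <;> cases b4 <;> cases b5 <;> rfl

lemma pvChain_le (b0 b1 b2 b3 b4 b5 : Bool) : pvChain b0 b1 b2 b3 b4 b5 ≤ 6 := by
  cases b0 <;> cases b1 <;> cases b2 <;> cases b3 <;> cases b4 <;> cases b5 <;> decide

lemma pvMatchAt_eq_chain (s : List Char) :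
    pvMatchAt s = pvChain
      (PySem.Chars.startswith s "prato a".toList || PySem.Chars.startswith s "prato gold".toList)
      (PySem.Chars.startswith s "prato b".toList || PySem.Chars.startswith s "prato silver".toList)
      (pvSet9.any (fun p => PySem.Chars.startswith s p))
      (PySem.Chars.startswith s "tribuna".toList)
      (PySem.Chars.startswith s "vip".toList || PySem.Chars.startswith s "hospitality".toList)
      (PySem.Chars.startswith s "pit".toList || PySem.Chars.startswith s "parterre".toList) := by
  unfold pvMatchAt pvChain
  split_ifs <;> rfl

-- the scan invariant: scanning s with accumulator b ≤ 6 yields min b (chain of the isIn flags)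
lemma pvScan_eq_chain (s : List Char) :
    ∀ b : Nat, b ≤ 6 →
      pvScan s b = min b (pvChain (pvG0 s) (pvG1 s) (pvG2 s) (pvG3 s) (pvG4 s) (pvG5 s)) := by
  induction s with
  | nil =>
      intro b hb
      obtain ⟨h0, h1, h2, h3, h4, h5⟩ := pvG_nil
      rw [pvScan, h0, h1, h2, h3, h4, h5]
      show b = min b 6
      omega
  | cons c r ih =>
      intro b hb
      rw [pvScan, ih _ (le_trans (min_le_left _ _) hb), pvMatchAt_eq_chain,
        min_assoc, pvChain_min, pvG0_cons, pvG1_cons, pvG2_cons, pvG3_cons, pvG4_cons, pvG5_cons]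

-- A's 29-term settore disjunction equals the nine-prefix disjunction pvG2
lemma pvSettore_mono (p q s : List Char) (hpq : p <+: q)
    (h : PySem.Chars.isIn q s = true) : PySem.Chars.isIn p s = true :=
  (PySem.Chars.isIn_iff_infix _ _).mpr (hpq.isInfix.trans ((PySem.Chars.isIn_iff_infix _ _).mp h))

def pvL29 : List (List Char) :=
  ["settore 1".toList, "settore 2".toList, "settore 3".toList, "settore 4".toList,
   "settore 5".toList, "settore 6".toList, "settore 7".toList, "settore 8".toList,
   "settore 9".toList, "settore 10".toList, "settore 11".toList, "settore 12".toList,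
   "settore 13".toList, "settore 14".toList, "settore 15".toList, "settore 16".toList,
   "settore 17".toList, "settore 18".toList, "settore 19".toList, "settore 20".toList,
   "settore 21".toList, "settore 22".toList, "settore 23".toList, "settore 24".toList,
   "settore 25".toList, "settore 26".toList, "settore 27".toList, "settore 28".toList,
   "settore 29".toList]

set_option maxHeartbeats 2000000 in
lemma pvL29_any_eq_pvG2 (s : List Char) :
    pvL29.any (fun p => PySem.Chars.isIn p s) = pvG2 s := by
  unfold pvG2
  rcases h : pvSet9.any (fun p => PySem.Chars.isIn p s) with _ | _
  · rw [List.any_eq_false]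
    intro p hp
    rw [List.any_eq_false] at h
    intro hin
    fin_cases hp
    exacts [h "settore 1".toList (by decide) (pvSettore_mono "settore 1".toList _ s (by decide) hin),
      h "settore 2".toList (by decide) (pvSettore_mono "settore 2".toList _ s (by decide) hin),
      h "settore 3".toList (by decide) (pvSettore_mono "settore 3".toList _ s (by decide) hin),
      h "settore 4".toList (by decide) (pvSettore_mono "settore 4".toList _ s (by decide) hin),
      h "settore 5".toList (by decide) (pvSettore_mono "settore 5".toList _ s (by decide) hin),
      h "settore 6".toList (by decide) (pvSettore_mono "settore 6".toList _ s (by decide) hin),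
      h "settore 7".toList (by decide) (pvSettore_mono "settore 7".toList _ s (by decide) hin),
      h "settore 8".toList (by decide) (pvSettore_mono "settore 8".toList _ s (by decide) hin),
      h "settore 9".toList (by decide) (pvSettore_mono "settore 9".toList _ s (by decide) hin),
      h "settore 1".toList (by decide) (pvSettore_mono "settore 1".toList _ s (by decide) hin),
      h "settore 1".toList (by decide) (pvSettore_mono "settore 1".toList _ s (by decide) hin),
      h "settore 1".toList (by decide) (pvSettore_mono "settore 1".toList _ s (by decide) hin),
      h "settore 1".toList (by decide) (pvSettore_mono "settore 1".toList _ s (by decide) hin),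
      h "settore 1".toList (by decide) (pvSettore_mono "settore 1".toList _ s (by decide) hin),
      h "settore 1".toList (by decide) (pvSettore_mono "settore 1".toList _ s (by decide) hin),
      h "settore 1".toList (by decide) (pvSettore_mono "settore 1".toList _ s (by decide) hin),
      h "settore 1".toList (by decide) (pvSettore_mono "settore 1".toList _ s (by decide) hin),
      h "settore 1".toList (by decide) (pvSettore_mono "settore 1".toList _ s (by decide) hin),
      h "settore 1".toList (by decide) (pvSettore_mono "settore 1".toList _ s (by decide) hin),
      h "settore 2".toList (by decide) (pvSettore_mono "settore 2".toList _ s (by decide) hin),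
      h "settore 2".toList (by decide) (pvSettore_mono "settore 2".toList _ s (by decide) hin),
      h "settore 2".toList (by decide) (pvSettore_mono "settore 2".toList _ s (by decide) hin),
      h "settore 2".toList (by decide) (pvSettore_mono "settore 2".toList _ s (by decide) hin),
      h "settore 2".toList (by decide) (pvSettore_mono "settore 2".toList _ s (by decide) hin),
      h "settore 2".toList (by decide) (pvSettore_mono "settore 2".toList _ s (by decide) hin),
      h "settore 2".toList (by decide) (pvSettore_mono "settore 2".toList _ s (by decide) hin),
      h "settore 2".toList (by decide) (pvSettore_mono "settore 2".toList _ s (by decide) hin),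
      h "settore 2".toList (by decide) (pvSettore_mono "settore 2".toList _ s (by decide) hin),
      h "settore 2".toList (by decide) (pvSettore_mono "settore 2".toList _ s (by decide) hin)]
  · rw [List.any_eq_true] at h ⊢
    obtain ⟨p, hp, hin⟩ := h
    fin_cases hp
    exacts [⟨"settore 1".toList, by decide, hin⟩,
      ⟨"settore 2".toList, by decide, hin⟩,
      ⟨"settore 3".toList, by decide, hin⟩,
      ⟨"settore 4".toList, by decide, hin⟩,
      ⟨"settore 5".toList, by decide, hin⟩,
      ⟨"settore 6".toList, by decide, hin⟩,
      ⟨"settore 7".toList, by decide, hin⟩,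
      ⟨"settore 8".toList, by decide, hin⟩,
      ⟨"settore 9".toList, by decide, hin⟩]

set_option maxHeartbeats 2000000 in
lemma pvRange_map :
    (PySem.List.pyRange 1 30 1).map (fun i => ("settore " ++ PySem.Int.toStr i).toList) = pvL29 := by
  decide

lemma pvSettore29 (t : String) :
    (PySem.List.pyRange 1 30 1).any (fun i => PySem.Str.isIn ("settore " ++ PySem.Int.toStr i) t)
      = pvG2 t.toList := by
  rw [← pvL29_any_eq_pvG2, ← pvRange_map, List.any_map]
  simp only [Function.comp_def, PySem.Str.isIn_eq]

-- selecting from pvCats by chain value = A's if/else cascade on the six flags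
lemma pvCats_getD_chain (b0 b1 b2 b3 b4 b5 : Bool) :
    pvCats.getD (pvChain b0 b1 b2 b3 b4 b5) "other"
      = (if b0 then "prato_a" else if b1 then "prato_b" else if b2 then "settore"
         else if b3 then "tribuna" else if b4 then "vip" else if b5 then "pit" else "other") := by
  cases b0 <;> cases b1 <;> cases b2 <;> cases b3 <;> cases b4 <;> cases b5 <;> rfl

-- ===== VERDICT (by name: the statement is the Claim_ definition above) =====
theorem categorize_ticket_spec : Claim_equal_categorize_ticket := by
  intro text _
  unfold Spec_categorize_ticket categorize_ticket_alt
  rw [pvScan_eq_chain _ 6 (le_refl 6),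
    min_eq_right (pvChain_le _ _ _ _ _ _), pvCats_getD_chain]
  simp only [categorize_ticket]
  rw [pvSettore29]
  simp only [PySem.Str.isIn_eq, pvG0, pvG1, pvG3, pvG4, pvG5]
  rfl
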